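-- pv_equiv track=rewrite | github.com/hayeonkimmie/Programmers | jieun/programmers/basic/230626.py | solution
-- ===== SOURCE A (Python) =====
-- def solution(num_list):
--     odd_sum = 0
--     even_sum = 0
--     for i in range(len(num_list)):
--         if i % 2 == 0:
--             odd_sum += num_list[i]
--         else:
--             even_sum += num_list[i]
--     return max(odd_sum, even_sum)
-- ===== SOURCE B (Python) =====
-- def solution(num_list):
--     # s = total sum; d = alternating sum a0 - a1 + a2 - ... (built right-to-left).
--     # even-index sum = (s + d) / 2, odd-index sum = (s - d) / 2, so the larger one
--     # is (s + abs(d)) // 2 (exact: s and d have the same parity).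
--     s = 0
--     d = 0
--     for x in reversed(num_list):
--         s += x
--         d = x - d
--     return (s + abs(d)) // 2
-- ===== Notes on version B (the rewrite author's own statement) =====
-- stated objective: alternative
-- what changed: Instead of splitting the list into two parity sums and comparing them, B computes the total sum and the alternating sum in one right-to-left fold with no index or parity test, then recovers the larger parity sum by the closed form (s + abs(d)) // 2.
import Mathlib
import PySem

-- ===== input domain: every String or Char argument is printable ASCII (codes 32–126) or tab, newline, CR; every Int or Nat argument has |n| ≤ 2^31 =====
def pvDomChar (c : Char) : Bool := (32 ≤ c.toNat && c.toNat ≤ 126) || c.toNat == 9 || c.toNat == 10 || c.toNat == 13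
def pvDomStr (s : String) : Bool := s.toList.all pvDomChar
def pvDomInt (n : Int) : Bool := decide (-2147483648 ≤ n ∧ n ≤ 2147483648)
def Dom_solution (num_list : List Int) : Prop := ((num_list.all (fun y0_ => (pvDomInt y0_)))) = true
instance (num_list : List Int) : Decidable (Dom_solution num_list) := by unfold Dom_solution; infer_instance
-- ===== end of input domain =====

-- B replaces A's parity-branch pass and final comparison by one fold computing (total sum, alternating sum) and the closed form (s+|d|)//2 (alternative algorithm, same cost).


-- ===== PORT A =====
-- loop body: 'if i % 2 == 0: odd_sum += num_list[i] else: even_sum += num_list[i]'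
def pvStepA (ys : List Int) (p : Int × Int) (i : Int) : Int × Int :=
  if i % 2 == 0 then (p.1 + PySem.List.pyGetD ys i 0, p.2) else (p.1, p.2 + PySem.List.pyGetD ys i 0)

def solution (num_list : List Int) : Int :=
  let r := (PySem.List.pyRange 0 (PySem.List.len num_list) 1).foldl (pvStepA num_list) (0, 0)
  max r.1 r.2

-- ===== PORT B =====
-- 'for x in reversed(num_list): s += x; d = x - d'
def pvStepB (p : Int × Int) (x : Int) : Int × Int := (p.1 + x, x - p.2)

def solution_alt (num_list : List Int) : Int :=
  let p := num_list.reverse.foldl pvStepB (0, 0)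
  PySem.Int.floordiv (p.1 + |p.2|) 2

-- ===== PRECONDITION & SPEC =====
def Spec_solution (num_list : List Int) (out : Int) : Prop := out = solution_alt num_list
instance (num_list : List Int) (out : Int) : Decidable (Spec_solution num_list out) := by unfold Spec_solution; infer_instance

-- ===== CLAIM (what is proved, stated in full; the proofs are below) =====
def Claim_equal_solution : Prop := ∀ (num_list : List Int), Dom_solution num_list → Spec_solution num_list (solution num_list)

-- ===== LEMMAS AND PROOFS =====

-- (even-index sum, odd-index sum) of a list
def pvPsum : List Int → Int × Int
  | [] => (0, 0)
  | x :: r => (x + (pvPsum r).2, (pvPsum r).1)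

-- B's fold (a foldl over the reverse = a foldr) yields (total sum, alternating sum) = (e + o, e - o)
lemma pvFoldB_psum : ∀ (xs : List Int),
    List.foldr (fun x p => pvStepB p x) ((0, 0) : Int × Int) xs =
      ((pvPsum xs).1 + (pvPsum xs).2, (pvPsum xs).1 - (pvPsum xs).2) := by
  intro xs
  induction xs with
  | nil => simp [pvPsum]
  | cons x r ih =>
    rw [List.foldr_cons, ih]
    simp [pvStepB, pvPsum, Prod.ext_iff]
    constructor <;> ring

-- the closed form: (e + o + |e - o|) // 2 = max e o
lemma pvClosed (e o : Int) : (e + o + |e - o|) / 2 = max e o := by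
  rcases le_total o e with h | h
  · rw [abs_of_nonneg (by omega), max_eq_left h,
      show e + o + (e - o) = 2 * e by ring, Int.mul_ediv_cancel_left _ (by omega)]
  · rw [abs_of_nonpos (by omega), max_eq_right h,
      show e + o + -(e - o) = 2 * o by ring, Int.mul_ediv_cancel_left _ (by omega)]

-- A's indexed fold computes the two parity sums (offset k into ys)
lemma pvFold_psum : ∀ (xs ys : List Int) (k : Nat) (p : Int × Int), ys.drop k = xs →
    (PySem.List.pyRange (k : Int) ((k : Int) + (xs.length : Int)) 1).foldl (pvStepA ys) p =
      if k % 2 = 0 then (p.1 + (pvPsum xs).1, p.2 + (pvPsum xs).2)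
      else (p.1 + (pvPsum xs).2, p.2 + (pvPsum xs).1) := by
  intro xs
  induction xs with
  | nil =>
    intro ys k p h
    simp only [List.length_nil, Nat.cast_zero, add_zero,
      PySem.List.pyRange_one_eq_nil le_rfl, List.foldl_nil, pvPsum]
    split <;> simp
  | cons x rest ih =>
    intro ys k p h
    have hget : ys[k]? = some x := by rw [← List.head?_drop, h]; rfl
    have hx : PySem.List.pyGetD ys (k : Int) 0 = x := by
      simp [List.getD, hget]
    rw [PySem.List.pyRange_one_cons (by push_cast [List.length_cons]; omega)]
    rw [List.foldl_cons]
    have hk1 : ((k : Int) + 1) = ((k + 1 : Nat) : Int) := by push_cast; ring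
    have hend : ((k : Int) + ((x :: rest).length : Int)) = ((k + 1 : Nat) : Int) + (rest.length : Int) := by
      push_cast [List.length_cons]; ring
    rw [hend, hk1, ih ys (k + 1) _ (by rw [← List.drop_drop, h]; simp)]
    by_cases hk : k % 2 = 0
    · have hb : ((k : Int) % 2 == 0) = true := by simp; omega
      rw [show pvStepA ys p (k : Int) = (p.1 + x, p.2) from by simp [pvStepA, hb, hx]]
      rw [if_pos hk, if_neg (by omega : ¬ (k + 1) % 2 = 0)]
      simp [pvPsum, Prod.ext_iff]; ring
    · have hb : ((k : Int) % 2 == 0) = false := by simp; omega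
      rw [show pvStepA ys p (k : Int) = (p.1, p.2 + x) from by simp [pvStepA, hb, hx]]
      rw [if_neg hk, if_pos (by omega : (k + 1) % 2 = 0)]
      simp [pvPsum, Prod.ext_iff]; ring

-- ===== VERDICT (by name: the statement is the Claim_ definition above) =====
theorem solution_spec : Claim_equal_solution := by
  intro xs _
  unfold Spec_solution solution solution_alt
  have h := pvFold_psum xs xs 0 (0, 0) (by simp)
  simp only [Nat.cast_zero, zero_add] at h
  simp [PySem.List.len_eq, h, pvFoldB_psum, pvClosed]
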